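-- pv_equiv track=rewrite | github.com/Programvaruteknik-aoc/AOC-2023 | day11/cosmic_expansion.py | expand_columns
-- ===== SOURCE A (Python) =====
-- def expand_columns(universe: list[str], columns_to_expand: list[int], expansion_rate) -> list[str]:
--     expanded_universe = []
--     for line in universe:
--         new_line = list(line)
--         for column in sorted(columns_to_expand, reverse=True):
--             for i in range(expansion_rate):
--                 new_line.insert(column, '.')
--         expanded_universe.append(''.join(new_line))
--     return expanded_universe
-- ===== SOURCE B (Python) =====
-- def expand_columns(universe: list[str], columns_to_expand: list[int], expansion_rate) -> list[str]:
--     dots = '.' * expansion_rate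
--     cols = sorted(columns_to_expand, reverse=True)
--     return [_splice_all(line, cols, dots) for line in universe]
--
--
-- def _splice_all(line: str, cols: list[int], dots: str) -> str:
--     for c in cols:
--         line = line[:c] + dots + line[c:]
--     return line
-- ===== Notes on version B (the rewrite author's own statement) =====
-- stated objective: faster
-- what changed: Instead of growing a char list with rate single-character list.insert calls per column per row, B sorts the columns once and splices the whole precomputed dot block into the string with one slice concatenation per column.
import Mathlib
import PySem

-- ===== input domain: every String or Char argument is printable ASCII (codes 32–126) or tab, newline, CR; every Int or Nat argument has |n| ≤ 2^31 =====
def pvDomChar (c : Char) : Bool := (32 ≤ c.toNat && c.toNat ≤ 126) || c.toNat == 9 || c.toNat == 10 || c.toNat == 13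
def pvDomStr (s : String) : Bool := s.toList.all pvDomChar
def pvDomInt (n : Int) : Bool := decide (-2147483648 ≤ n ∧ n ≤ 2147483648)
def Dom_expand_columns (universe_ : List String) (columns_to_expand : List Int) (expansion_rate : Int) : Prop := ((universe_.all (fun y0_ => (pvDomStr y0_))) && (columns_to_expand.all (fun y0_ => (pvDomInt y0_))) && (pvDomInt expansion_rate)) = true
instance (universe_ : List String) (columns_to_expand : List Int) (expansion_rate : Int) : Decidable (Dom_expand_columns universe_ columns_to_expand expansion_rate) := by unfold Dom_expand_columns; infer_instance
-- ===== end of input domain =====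

-- B replaces A's per-character insertion loop (rate single-char list inserts per column) by one
-- slice splice of the precomputed dot block per column; same return value.

-- ===== PORT A =====
def expand_columns (universe_ : List String) (columns_to_expand : List Int) (expansion_rate : Int) : List String :=
  universe_.foldl (fun expanded_universe line =>
    let new_line :=
      (PySem.List.sorted columns_to_expand (fun x => x) true).foldl
        (fun new_line column =>
          (PySem.List.pyRange 0 expansion_rate 1).foldl
            (fun new_line _ => PySem.List.insert new_line column '.') new_line)
        line.toList
    expanded_universe ++ [String.ofList new_line]) []

-- ===== PORT B =====
-- Source B: line = line[:c] + dots + line[c:]  (Python slices, via PySem.List.slice on the char list)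
def pvSpliceAll (cols : List Int) (dots : List Char) (line : List Char) : List Char :=
  cols.foldl (fun line c =>
    PySem.List.slice line none (some c) ++ dots ++ PySem.List.slice line (some c) none) line

def expand_columns_alt (universe_ : List String) (columns_to_expand : List Int) (expansion_rate : Int) : List String :=
  let dots := List.replicate expansion_rate.toNat '.'   -- '.' * expansion_rate
  let cols := PySem.List.sorted columns_to_expand (fun x => x) true
  universe_.map (fun line => String.ofList (pvSpliceAll cols dots line.toList))

-- ===== PRECONDITION & SPEC =====
def Spec_expand_columns (universe_ : List String) (columns_to_expand : List Int) (expansion_rate : Int) (out : List String) : Prop := out = expand_columns_alt universe_ columns_to_expand expansion_rate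
instance (universe_ : List String) (columns_to_expand : List Int) (expansion_rate : Int) (out : List String) : Decidable (Spec_expand_columns universe_ columns_to_expand expansion_rate out) := by unfold Spec_expand_columns; infer_instance

-- ===== CLAIM =====
def Claim_equal_expand_columns : Prop := ∀ (universe_ : List String) (columns_to_expand : List Int) (expansion_rate : Int), Dom_expand_columns universe_ columns_to_expand expansion_rate → Spec_expand_columns universe_ columns_to_expand expansion_rate (expand_columns universe_ columns_to_expand expansion_rate)

-- ===== LEMMAS AND PROOFS =====

-- Python's clamped insertion position (= slice clamp = list.insert clamp)
def pvClampPos (n : Nat) (c : Int) : Nat :=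
  if c < 0 then ((n : Int) + c).toNat else min c.toNat n

lemma pvClampPos_le (n : Nat) (c : Int) : pvClampPos n c ≤ n := by
  unfold pvClampPos; split <;> omega

lemma pvClampPos_mono (n r : Nat) (c : Int) :
    pvClampPos n c ≤ pvClampPos (n + r) c ∧ pvClampPos (n + r) c ≤ pvClampPos n c + r := by
  unfold pvClampPos; split <;> omega

lemma slice_to_clamp (xs : List Char) (c : Int) :
    PySem.List.slice xs none (some c) = xs.take (pvClampPos xs.length c) := by
  by_cases h : c < 0
  · have hk : c = -(((-c).toNat : Nat) : Int) := by omega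
    have hk0 : 0 < (-c).toNat := by omega
    rw [hk, PySem.List.slice_to_neg_natCast xs _ hk0]
    congr 1
    unfold pvClampPos
    simp only [if_pos (by omega : -(((-c).toNat : Nat) : Int) < 0)]
    omega
  · rw [PySem.List.slice_to xs (by omega : (0:Int) ≤ c)]
    unfold pvClampPos
    simp only [if_neg h]
    conv_lhs => rw [List.take_eq_take_min]

lemma slice_from_clamp (xs : List Char) (c : Int) :
    PySem.List.slice xs (some c) none = xs.drop (pvClampPos xs.length c) := by
  by_cases h : c < 0
  · have hk : c = -(((-c).toNat : Nat) : Int) := by omega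
    have hk0 : 0 < (-c).toNat := by omega
    rw [hk, PySem.List.slice_from_neg_natCast xs _ hk0]
    congr 1
    unfold pvClampPos
    simp only [if_pos (by omega : -(((-c).toNat : Nat) : Int) < 0)]
    omega
  · rw [PySem.List.slice_from xs (by omega : (0:Int) ≤ c)]
    unfold pvClampPos
    simp only [if_neg h]
    conv_lhs => rw [List.drop_eq_drop_min]

lemma insert_norm (xs : List Char) (c : Int) (v : Char) :
    PySem.List.insert xs c v =
      xs.take (pvClampPos xs.length c) ++ v :: xs.drop (pvClampPos xs.length c) := by
  have h : pvClampPos xs.length c =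
      (if c < 0 then max (c + (xs.length : Int)) 0 else min c (xs.length : Int)).toNat := by
    unfold pvClampPos; split <;> omega
  simp only [PySem.List.insert, PySem.List.sliceIndices, h]
  norm_num

lemma foldl_const {α β : Type} (l : List β) (f : α → α) (s : α) :
    l.foldl (fun a _ => f a) s = f^[l.length] s := by
  induction l generalizing s with
  | nil => rfl
  | cons x t ih => simp [List.foldl_cons, ih, Function.iterate_succ_apply]

lemma rep_merge (a b : Nat) (t : List Char) :
    List.replicate a '.' ++ ('.' :: (List.replicate b '.' ++ t))
      = List.replicate (a + b + 1) '.' ++ t := by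
  induction a with
  | zero => simp [List.replicate_succ]
  | succ a ih =>
    have h : a + 1 + b + 1 = (a + b + 1) + 1 := by omega
    simp only [List.replicate_succ, List.cons_append, ih, h]

lemma iter_insert (c : Int) (r : Nat) (xs : List Char) :
    (fun l => PySem.List.insert l c '.')^[r] xs =
      xs.take (pvClampPos xs.length c) ++ List.replicate r '.' ++ xs.drop (pvClampPos xs.length c) := by
  induction r with
  | zero => simp
  | succ r ih =>
    rw [Function.iterate_succ_apply', ih]
    simp only [insert_norm]
    have hpL : pvClampPos xs.length c ≤ xs.length := pvClampPos_le _ _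
    set p := pvClampPos xs.length c with hp
    have hlen : (xs.take p ++ List.replicate r '.' ++ xs.drop p).length = xs.length + r := by
      simp; omega
    rw [hlen]
    obtain ⟨h1, h2⟩ := pvClampPos_mono xs.length r c
    set q := pvClampPos (xs.length + r) c with hq
    rw [List.append_assoc, List.take_append, List.drop_append]
    have hlt : (xs.take p).length = p := by simp; omega
    rw [hlt]
    rw [List.take_of_length_le (by omega : (xs.take p).length ≤ q),
        List.drop_eq_nil_of_le (by omega : (xs.take p).length ≤ q)]
    rw [List.take_append, List.drop_append]
    simp only [List.take_replicate, List.drop_replicate, List.length_replicate]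
    have hq1 : min (q - p) r = q - p := by omega
    have hq2 : q - p - r = 0 := by omega
    rw [hq1, hq2]
    simp only [List.take_zero, List.drop_zero, List.nil_append, List.append_assoc]
    rw [rep_merge]
    have h3 : q - p + (r - (q - p)) + 1 = r + 1 := by omega
    rw [h3]

lemma line_eq (cols : List Int) (rate : Int) (s : List Char) :
    cols.foldl
      (fun new_line column =>
        (PySem.List.pyRange 0 rate 1).foldl
          (fun new_line _ => PySem.List.insert new_line column '.') new_line) s
    = pvSpliceAll cols (List.replicate rate.toNat '.') s := by
  unfold pvSpliceAll
  induction cols generalizing s with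
  | nil => rfl
  | cons c t ih =>
    simp only [List.foldl_cons]
    rw [foldl_const, PySem.List.length_pyRange_one, iter_insert]
    have : (rate - 0).toNat = rate.toNat := by omega
    rw [this, ih, slice_to_clamp, slice_from_clamp]

lemma foldl_append_map {α β : Type} (l : List α) (g : α → β) (acc : List β) :
    l.foldl (fun a x => a ++ [g x]) acc = acc ++ l.map g := by
  induction l generalizing acc with
  | nil => simp
  | cons x t ih => simp [List.foldl_cons, ih]

-- ===== VERDICT =====
theorem expand_columns_spec : Claim_equal_expand_columns := by
  intro universe_ columns_to_expand expansion_rate _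
  unfold Spec_expand_columns expand_columns expand_columns_alt
  simp only [foldl_append_map, List.nil_append]
  apply List.map_congr_left
  intro line _
  rw [line_eq]
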